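-- pv_equiv track=rewrite | github.com/Ace1928/eidosian_forge | archive_forge/code/func_format_formula.py | format_formula
-- ===== SOURCE A (Python) =====
-- def format_formula(formula: str) -> str:
--     """Converts str of chemical formula into
--     latex format for labelling purposes.
--
--     Args:
--         formula (str): Chemical formula
--     """
--     formatted_formula = ''
--     number_format = ''
--     for idx, char in enumerate(formula, start=1):
--         if char.isdigit():
--             if not number_format:
--                 number_format = '_{'
--             number_format += char
--             if idx == len(formula):
--                 number_format += '}'
--                 formatted_formula += number_format
--         else:
--             if number_format:
--                 number_format += '}'
--                 formatted_formula += number_format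
--                 number_format = ''
--             formatted_formula += char
--     return f'${formatted_formula}$'
-- ===== SOURCE B (Python) =====
-- def format_formula(formula: str) -> str:
--     """Converts str of chemical formula into
--     latex format for labelling purposes.
--
--     Args:
--         formula (str): Chemical formula
--     """
--     pieces = []
--     i, n = 0, len(formula)
--     while i < n:
--         if formula[i].isdigit():
--             j = i + 1
--             while j < n and formula[j].isdigit():
--                 j += 1
--             pieces.append('_{' + formula[i:j] + '}')
--             i = j
--         else:
--             pieces.append(formula[i])
--             i += 1
--     return '$' + ''.join(pieces) + '$'
-- ===== Notes on version B (the rewrite author's own statement) =====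
-- stated objective: simpler
-- what changed: Replaced A's per-character accumulator/flag state machine (with a 1-based-index test for the last character) by a single index-based pass that extracts each maximal digit run with an inner scan, wraps it as a LaTeX subscript, and joins the pieces at the end.
import Mathlib
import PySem

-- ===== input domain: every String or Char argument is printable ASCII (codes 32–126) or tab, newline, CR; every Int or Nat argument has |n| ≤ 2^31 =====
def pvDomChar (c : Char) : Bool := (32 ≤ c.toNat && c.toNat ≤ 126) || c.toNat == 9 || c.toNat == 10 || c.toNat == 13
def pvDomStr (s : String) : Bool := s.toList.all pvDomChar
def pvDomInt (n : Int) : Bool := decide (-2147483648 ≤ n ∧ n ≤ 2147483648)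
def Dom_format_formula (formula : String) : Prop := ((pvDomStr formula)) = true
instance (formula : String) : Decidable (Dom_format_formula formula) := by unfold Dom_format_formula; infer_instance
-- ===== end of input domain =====

-- B replaces A's per-character accumulator/flag state machine by a single pass over maximal digit runs (simpler decomposition, same cost).

-- ===== PORT A =====
-- A's loop: state (formatted_formula, number_format), 1-based index to detect the last character.
def ffLoopA : List Char → Nat → Nat → List Char → List Char → List Char
  | [], _, _, fm, _ => fm
  | c :: rest, idx, len, fm, nf =>
    if PySem.Chars.isdigit c then
      let nf1 := (if nf = [] then ['_', '{'] else nf) ++ [c]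
      if idx = len then ffLoopA rest (idx + 1) len (fm ++ (nf1 ++ ['}'])) (nf1 ++ ['}'])
      else ffLoopA rest (idx + 1) len fm nf1
    else
      if nf = [] then ffLoopA rest (idx + 1) len (fm ++ [c]) nf
      else ffLoopA rest (idx + 1) len ((fm ++ (nf ++ ['}'])) ++ [c]) []

def format_formula (formula : String) : String :=
  String.ofList (['$'] ++ ffLoopA formula.toList 1 formula.toList.length [] [] ++ ['$'])

-- ===== PORT B =====
-- B's pass over maximal runs: a digit run becomes '_{run}', other characters pass through.
def ffRunsB : List Char → List (List Char)
  | [] => []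
  | c :: rest =>
    if PySem.Chars.isdigit c then
      (['_', '{'] ++ (c :: rest.takeWhile PySem.Chars.isdigit) ++ ['}'])
        :: ffRunsB (rest.dropWhile PySem.Chars.isdigit)
    else [c] :: ffRunsB rest
termination_by cs => cs.length
decreasing_by
  · exact Nat.lt_succ_of_le (List.length_dropWhile_le _ _)
  · exact Nat.lt_succ_self _

def format_formula_alt (formula : String) : String :=
  String.ofList (['$'] ++ (ffRunsB formula.toList).flatten ++ ['$'])

-- ===== PRECONDITION & SPEC =====
def Spec_format_formula (formula : String) (out : String) : Prop := out = format_formula_alt formula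
instance (formula : String) (out : String) : Decidable (Spec_format_formula formula out) := by unfold Spec_format_formula; infer_instance

-- ===== CLAIM (what is proved, stated in full; the proofs are below) =====
def Claim_equal_format_formula : Prop := ∀ (formula : String), Dom_format_formula formula → Spec_format_formula formula (format_formula formula)

-- ===== LEMMAS AND PROOFS =====

-- Combined loop invariant, by strong induction on the remaining suffix:
-- (1) from a closed state (nf = []) A's loop appends exactly B's runs;
-- (2) from an open digit run '_{ds' it closes the current maximal run and continues as (1).
lemma ffLoop_main (n : Nat) : ∀ cs : List Char, cs.length ≤ n →
    (∀ idx len fm, idx + cs.length = len + 1 →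
      ffLoopA cs idx len fm [] = fm ++ (ffRunsB cs).flatten) ∧
    (∀ idx len fm ds, cs ≠ [] → idx + cs.length = len + 1 →
      ffLoopA cs idx len fm ('_' :: '{' :: ds) =
        fm ++ (('_' :: '{' :: (ds ++ cs.takeWhile PySem.Chars.isdigit)) ++ ['}'])
           ++ (ffRunsB (cs.dropWhile PySem.Chars.isdigit)).flatten) := by
  induction n with
  | zero =>
    intro cs hlen
    have : cs = [] := List.length_eq_zero_iff.mp (Nat.le_zero.mp hlen)
    subst this
    refine ⟨fun idx len fm _ => by simp [ffLoopA, ffRunsB], fun _ _ _ _ h _ => absurd rfl h⟩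
  | succ n ih =>
    intro cs hlen
    match cs with
    | [] =>
      refine ⟨fun idx len fm _ => by simp [ffLoopA, ffRunsB], fun _ _ _ _ h _ => absurd rfl h⟩
    | c :: rest =>
      have hrest : rest.length ≤ n := by simpa using hlen
      constructor
      · intro idx len fm hidx
        by_cases hd : PySem.Chars.isdigit c
        · by_cases hr : rest = []
          · subst hr
            have : idx = len := by simp only [List.length_cons, List.length_nil] at hidx; omega
            simp [ffLoopA, hd, this, ffRunsB]
          · have hne : idx ≠ len := by
              intro h; subst h
              have : rest.length = 0 := by simp only [List.length_cons, List.length_nil] at hidx; omega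
              exact hr (List.length_eq_zero_iff.mp this)
            have h2 := (ih rest hrest).2 (idx + 1) len fm [c] hr
              (by simp only [List.length_cons] at hidx ⊢; omega)
            simp only [ffLoopA, hd, hne, if_true, if_false] at h2 ⊢
            simp [h2, ffRunsB, hd]
        · have h1 := (ih rest hrest).1 (idx + 1) len (fm ++ [c])
            (by simp only [List.length_cons] at hidx ⊢; omega)
          simp only [ffLoopA, hd] at h1 ⊢
          simp [h1, ffRunsB, hd]
      · intro idx len fm ds _ hidx
        by_cases hd : PySem.Chars.isdigit c
        · by_cases hr : rest = []
          · subst hr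
            have : idx = len := by simp only [List.length_cons, List.length_nil] at hidx; omega
            simp [ffLoopA, hd, this, List.takeWhile, List.dropWhile, ffRunsB]
          · have hne : idx ≠ len := by
              intro h; subst h
              have : rest.length = 0 := by simp only [List.length_cons, List.length_nil] at hidx; omega
              exact hr (List.length_eq_zero_iff.mp this)
            have h2 := (ih rest hrest).2 (idx + 1) len fm (ds ++ [c]) hr
              (by simp only [List.length_cons] at hidx ⊢; omega)
            simp only [ffLoopA, hd, hne, if_true, if_false] at h2 ⊢
            simp only [List.takeWhile, List.dropWhile, hd]
            simp at h2 ⊢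
            simpa [List.append_assoc] using h2
        · have h1 := (ih rest hrest).1 (idx + 1) len ((fm ++ ('_' :: '{' :: ds ++ ['}'])) ++ [c])
            (by simp only [List.length_cons] at hidx ⊢; omega)
          simp only [ffLoopA, hd] at h1 ⊢
          simp only [List.takeWhile, List.dropWhile, hd]
          simp [ffRunsB, hd]
          simpa using h1

-- ===== VERDICT (by name: the statement is the Claim_ definition above) =====
theorem format_formula_spec : Claim_equal_format_formula := by
  intro formula _
  unfold Spec_format_formula format_formula format_formula_alt
  have h := (ffLoop_main formula.toList.length formula.toList le_rfl).1 1
    formula.toList.length [] (by omega)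
  simp at h
  simp [h]
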